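-- pv_equiv track=rewrite | github.com/Josh1108/EPL_Data | epl/Scripts/scraper_for_target.py | index_name
-- ===== SOURCE A (Python) =====
-- def index_name(s):
--     count =0
--     t=''
--     for ch in s:
--         if ch=='/' and count!=6:
--             count+=1
--         elif ch == '?' and count ==6:
--             break
--         elif count==6:
--             t+=ch
--     return t
-- ===== SOURCE B (Python) =====
-- def index_name(s):
--     # Locate the tail just after the 6th slash, then slice up to the first question mark.
--     rest = s
--     for _ in range(6):
--         i = rest.find('/')
--         if i == -1:
--             return ''
--         rest = rest[i+1:]
--     q = rest.find('?')
--     return rest if q == -1 else rest[:q]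
-- ===== Notes on version B (the rewrite author's own statement) =====
-- stated objective: faster
-- what changed: Replaces the stateful per-character counter/accumulator loop by six find-the-slash-and-slice steps followed by a single slice up to the first question mark, which moves the scanning into C-level str.find/slicing.
import Mathlib
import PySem

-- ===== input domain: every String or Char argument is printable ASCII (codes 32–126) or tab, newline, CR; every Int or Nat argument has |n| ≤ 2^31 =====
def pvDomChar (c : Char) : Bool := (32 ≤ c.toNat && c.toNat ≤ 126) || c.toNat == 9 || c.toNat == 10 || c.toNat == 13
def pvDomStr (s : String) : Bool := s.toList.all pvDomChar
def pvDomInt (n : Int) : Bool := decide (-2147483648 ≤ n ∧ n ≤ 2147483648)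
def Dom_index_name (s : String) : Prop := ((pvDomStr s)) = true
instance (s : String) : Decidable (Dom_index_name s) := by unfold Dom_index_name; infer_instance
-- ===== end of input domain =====

-- B replaces A's stateful per-character counter/accumulator loop by six find-the-slash-and-slice
-- steps followed by a single slice up to the first question mark (objective: faster, constant-factor).

-- ===== PORT A =====
-- the for loop with break, as structural recursion over the characters with state (count, t)
def goA : List Char → Int → List Char → List Char
  | [], _, t => t
  | c :: cs, count, t =>
    if c = '/' ∧ count ≠ 6 then goA cs (count + 1) t
    else if c = '?' ∧ count = 6 then t
    else if count = 6 then goA cs count (t ++ [c])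
    else goA cs count t

def index_name (s : String) : String := String.ofList (goA s.toList 0 [])

-- ===== PORT B =====
-- the range(6) loop with early return '' , as recursion on the counter; none = returned ''
def goB : Nat → List Char → Option (List Char)
  | 0, rest => some rest
  | k + 1, rest =>
    let i := PySem.Chars.find rest ['/']
    if i = -1 then none else goB k (rest.drop (i.toNat + 1))

def index_name_alt (s : String) : String :=
  match goB 6 s.toList with
  | none => ""
  | some rest =>
    let q := PySem.Chars.find rest ['?']
    if q = -1 then String.ofList rest else String.ofList (rest.take q.toNat)

-- ===== PRECONDITION & SPEC =====
def Spec_index_name (s : String) (out : String) : Prop := out = index_name_alt s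
instance (s : String) (out : String) : Decidable (Spec_index_name s out) := by unfold Spec_index_name; infer_instance

-- ===== CLAIM (what is proved, stated in full; the proofs are below) =====
def Claim_equal_index_name : Prop := ∀ (s : String), Dom_index_name s → Spec_index_name s (index_name s)

-- ===== LEMMAS AND PROOFS =====

lemma takeWhile_cons_ne {c a : Char} (l : List Char) (h : a ≠ c) :
    (a :: l).takeWhile (fun x => x != c) = a :: l.takeWhile (fun x => x != c) := by
  have hb : (a != c) = true := bne_iff_ne.mpr h
  simp [hb]

lemma takeWhile_cons_self (c : Char) (l : List Char) :
    (c :: l).takeWhile (fun x => x != c) = [] := by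
  simp

lemma singleton_prefix_drop_takeWhile (l : List Char) (c : Char) :
    c ∈ l → [c] <+: l.drop (l.takeWhile (fun x => x != c)).length := by
  induction l with
  | nil => simp
  | cons a l ih =>
    intro h
    by_cases hac : a = c
    · subst hac; simp
    · have hc : c ∈ l := by
        rcases List.mem_cons.mp h with h | h
        · exact absurd h.symm hac
        · exact h
      rw [takeWhile_cons_ne l hac, List.length_cons, List.drop_succ_cons]
      exact ih hc

lemma not_singleton_prefix_drop_lt (l : List Char) (c : Char) :
    ∀ i < (l.takeWhile (fun x => x != c)).length, ¬ [c] <+: l.drop i := by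
  induction l with
  | nil => simp
  | cons a l ih =>
    by_cases hac : a = c
    · subst hac; simp
    · intro i hi hpre
      rw [takeWhile_cons_ne l hac, List.length_cons] at hi
      match i with
      | 0 =>
        rw [List.drop_zero] at hpre
        rcases hpre with ⟨t, ht⟩
        simp at ht
        exact hac ht.1.symm
      | Nat.succ j =>
        exact ih j (Nat.lt_of_succ_lt_succ hi) (by simpa using hpre)

-- find of a single character: -1 if absent, else the length of the maximal ≠-prefix
lemma find_singleton (l : List Char) (c : Char) :
    PySem.Chars.find l [c] =
      if c ∈ l then ((l.takeWhile (fun x => x != c)).length : Int) else -1 := by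
  by_cases h : c ∈ l
  · have hinf : [c] <:+: l := by
      rcases List.append_of_mem h with ⟨s, t, rfl⟩
      exact ⟨s, t, by simp⟩
    have h0 : 0 ≤ PySem.Chars.find l [c] := (PySem.Chars.find_nonneg_iff l [c]).mpr hinf
    obtain ⟨hpre, hmin⟩ := PySem.Chars.find_spec h0
    have h1 := singleton_prefix_drop_takeWhile l c h
    have h2 := not_singleton_prefix_drop_lt l c
    have hle1 : ¬ ((PySem.Chars.find l [c]).toNat < (l.takeWhile (fun x => x != c)).length) :=
      fun hlt => h2 _ hlt hpre
    have hle2 : ¬ ((l.takeWhile (fun x => x != c)).length < (PySem.Chars.find l [c]).toNat) :=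
      fun hlt => hmin _ hlt h1
    simp only [h, if_true]
    omega
  · have : ¬ [c] <:+: l := fun hinf => h (hinf.subset (by simp))
    simp [h, (PySem.Chars.find_eq_neg_one_iff l [c]).mpr this]

-- once count = 6, A's loop appends everything up to the first '?'
lemma goA_six (l : List Char) (t : List Char) :
    goA l 6 t = t ++ l.takeWhile (fun x => x != '?') := by
  induction l generalizing t with
  | nil => simp [goA]
  | cons c cs ih =>
    by_cases hc : c = '?'
    · subst hc; simp [goA]
    · rw [takeWhile_cons_ne cs hc]
      simp [goA, hc, ih]

-- B's skipping loop ignores a non-'/' head character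
lemma goB_cons_of_ne (n : Nat) (a : Char) (l : List Char) (ha : a ≠ '/') :
    goB (n + 1) (a :: l) = goB (n + 1) l := by
  by_cases h : '/' ∈ l
  · have hmem : '/' ∈ a :: l := List.mem_cons_of_mem a h
    simp only [goB, find_singleton, hmem, h, if_true]
    rw [takeWhile_cons_ne l ha, List.length_cons]
    have hne1 : ¬ (((l.takeWhile (fun x => x != '/')).length + 1 : Nat) : Int) = -1 := by omega
    have hne2 : ¬ (((l.takeWhile (fun x => x != '/')).length : Nat) : Int) = -1 := by omega
    simp only [hne1, hne2, if_false]
    congr 1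
  · have hmem : '/' ∉ a :: l := by
      simp only [List.mem_cons, not_or]
      exact ⟨Ne.symm ha, h⟩
    simp [goB, find_singleton, hmem, h]

-- main correspondence: A's loop at count 5 - n equals B's remaining n+1 skipping steps
lemma goA_goB (l : List Char) (n : Nat) (t : List Char) :
    goA l ((5 : Int) - n) t =
      match goB (n + 1) l with
      | none => t
      | some r => t ++ r.takeWhile (fun x => x != '?') := by
  induction l generalizing n t with
  | nil =>
    have : '/' ∉ ([] : List Char) := by simp
    simp [goA, goB, find_singleton, this]
  | cons a l ih =>
    have hcount : ((5 : Int) - n) ≠ 6 := by omega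
    by_cases ha : a = '/'
    · subst ha
      have hmem : '/' ∈ '/' :: l := List.mem_cons_self ..
      rw [goA]
      simp only [hcount, ne_eq, not_false_eq_true, and_true]
      rw [goB]
      simp only [find_singleton, hmem, if_true, takeWhile_cons_self, List.length_nil]
      norm_num
      match n with
      | 0 =>
        have h6 : (5 : Int) - ((0 : Nat) : Int) + 1 = 6 := by norm_num
        rw [h6, goA_six]
        simp [goB]
      | Nat.succ m =>
        have h5 : (5 : Int) - ((Nat.succ m : Nat) : Int) + 1 = 5 - ((m : Nat) : Int) := by
          push_cast; ring
        rw [h5, ih]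
    · have h1 : ¬ (a = '/' ∧ ((5 : Int) - n) ≠ 6) := fun h => ha h.1
      rw [goA]
      simp only [h1, hcount, and_false, if_false]
      rw [goB_cons_of_ne n a l ha]
      exact ih n t

lemma takeWhile_of_not_mem (l : List Char) (c : Char) (h : c ∉ l) :
    l.takeWhile (fun x => x != c) = l := by
  induction l with
  | nil => rfl
  | cons a l ih =>
    simp only [List.mem_cons, not_or] at h
    rw [takeWhile_cons_ne l (Ne.symm h.1), ih h.2]

lemma take_takeWhile_length (l : List Char) (c : Char) :
    l.take (l.takeWhile (fun x => x != c)).length = l.takeWhile (fun x => x != c) :=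
  (List.prefix_iff_eq_take.mp (List.takeWhile_prefix _)).symm

-- ===== VERDICT (by name: the statement is the Claim_ definition above) =====
theorem index_name_spec : Claim_equal_index_name := by
  intro s _
  unfold Spec_index_name index_name index_name_alt
  have h0 : (0 : Int) = 5 - ((5 : Nat) : Int) := by norm_num
  rw [h0, goA_goB s.toList 5 []]
  cases hB : goB 6 s.toList with
  | none => rfl
  | some r =>
    simp only [List.nil_append]
    by_cases h : '?' ∈ r
    · have hq : ¬ ((((r.takeWhile (fun x => x != '?')).length : Nat) : Int)) = -1 := by omega
      simp [find_singleton, h, hq, take_takeWhile_length]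
    · simp [find_singleton, h, takeWhile_of_not_mem r '?' h]
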